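-- pv_equiv track=rewrite | github.com/Kazofeifa/Tarea1AzofeifaOrozco | Funciones.py | verify_array_op
-- ===== SOURCE A (Python) =====
-- def multiple_op(x):
--     Arreglo = []
--     contador = 1
--     factorial = 1
--     # PRIMERO SE VERIFICA QUE EL TIPO DE DATO ES VALIDO
--     if(type(x) != int):
--         # CODIGO DE ERROR 805: TIPO DE DATO INVALIDO
--         return 805
--     else:
--         Arreglo.append(x*x)
--         Arreglo.append(pow(2, x))
--         while (contador <= x):
--             factorial = factorial * contador
--             contador = contador + 1
--         else:
--             Arreglo.append(factorial)
--             return Arreglo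
--
-- def verify_array_op(Arreglo):
--     Resultado = []
--     contador = 0
--     while(contador < 3):
--         # PARA CADA ELEMENTO DE LA LISTA SE VALIDA EL TIPO DE DATO
--         if(type(Arreglo[contador]) != int):
--             # CODIGO DE ERROR 508: DATO INVALIDO EN LISTA
--             return 508
--         else:
--             Resultado.append(multiple_op(Arreglo[contador]))
--             contador = contador + 1
--     return Resultado
-- ===== SOURCE B (Python) =====
-- def prod_range(lo, hi):
--     """Product of the integers lo..hi by balanced divide and conquer (1 if empty)."""
--     if lo > hi:
--         return 1
--     if lo == hi:
--         return lo
--     mid = (lo + hi) // 2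
--     return prod_range(lo, mid) * prod_range(mid + 1, hi)
--
--
-- def verify_array_op(Arreglo):
--     return [[x * x, 2 ** x, prod_range(2, x)] for x in Arreglo[:3]]
-- ===== Notes on version B (the rewrite author's own statement) =====
-- stated objective: faster
-- what changed: The index-counting while-loop with per-element dispatch into multiple_op (itself a sequential while-loop factorial accumulator) is replaced by a comprehension over the first three elements with a balanced divide-and-conquer range product for the factorial.
import Mathlib
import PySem

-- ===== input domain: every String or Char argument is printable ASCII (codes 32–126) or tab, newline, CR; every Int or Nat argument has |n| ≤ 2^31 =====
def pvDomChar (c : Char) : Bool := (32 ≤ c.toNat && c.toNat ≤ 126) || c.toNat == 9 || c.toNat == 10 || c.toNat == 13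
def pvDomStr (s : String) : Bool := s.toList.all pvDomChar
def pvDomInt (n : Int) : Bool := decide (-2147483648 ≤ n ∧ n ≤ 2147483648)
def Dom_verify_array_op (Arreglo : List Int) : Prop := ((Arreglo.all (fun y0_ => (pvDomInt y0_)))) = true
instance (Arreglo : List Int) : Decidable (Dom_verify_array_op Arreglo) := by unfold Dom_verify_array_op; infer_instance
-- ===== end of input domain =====

-- B replaces A's counter-driven while-loops (outer index loop + sequential factorial accumulator)
-- by a comprehension over the first three elements with a balanced divide-and-conquer range product.


-- ===== PORT A =====
-- while (contador <= x): factorial *= contador; contador += 1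
def factLoopA (contador factorial x : Int) : Int :=
  if contador ≤ x then factLoopA (contador + 1) (factorial * contador) x else factorial
termination_by (x + 1 - contador).toNat
decreasing_by omega

-- multiple_op: the `type(x) != int` branch cannot fire on an Int argument; pow(2, x) is
-- exact for 0 ≤ x (negative x, where Python returns a float, is excluded by Pre_).
def multiple_op (x : Int) : List Int :=
  [x * x, 2 ^ x.toNat, factLoopA 1 1 x]

-- while (contador < 3): index the list (IndexError = none, excluded by Pre_), append, advance
def verifyLoopA (Arreglo : List Int) (Resultado : List (List Int)) (contador : Nat) : List (List Int) :=
  if contador < 3 then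
    match PySem.List.pyGet? Arreglo (contador : Int) with
    | none => []  -- IndexError; outside Pre_
    | some v => verifyLoopA Arreglo (Resultado ++ [multiple_op v]) (contador + 1)
  else Resultado
termination_by 3 - contador

def verify_array_op (Arreglo : List Int) : List (List Int) :=
  verifyLoopA Arreglo [] 0

-- ===== PORT B =====
def prodRange (lo hi : Int) : Int :=
  if lo > hi then 1
  else if lo = hi then lo
  else
    let mid := PySem.Int.floordiv (lo + hi) 2
    prodRange lo mid * prodRange (mid + 1) hi
termination_by (hi - lo).toNat
decreasing_by
  all_goals simp only [PySem.Int.floordiv_eq_ediv_of_pos (by omega : (0:Int) < 2)] at *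
  all_goals omega

def verify_array_op_alt (Arreglo : List Int) : List (List Int) :=
  (Arreglo.take 3).map (fun x => [x * x, 2 ^ x.toNat, prodRange 2 x])

-- ===== PRECONDITION & SPEC =====
-- Pre_ excludes lists shorter than 3 (A raises IndexError) and lists whose first three
-- elements include a negative x (there pow(2, x) makes A return a float, not a list of ints).
def Pre_verify_array_op (Arreglo : List Int) : Prop :=
  3 ≤ Arreglo.length ∧ ∀ x ∈ Arreglo.take 3, 0 ≤ x
instance (Arreglo : List Int) : Decidable (Pre_verify_array_op Arreglo) := by
  unfold Pre_verify_array_op; infer_instance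
def pvWitness_verify_array_op : List Int := [2, 3, 4]

def Spec_verify_array_op (Arreglo : List Int) (out : List (List Int)) : Prop := out = verify_array_op_alt Arreglo
instance (Arreglo : List Int) (out : List (List Int)) : Decidable (Spec_verify_array_op Arreglo out) := by unfold Spec_verify_array_op; infer_instance

-- ===== CLAIM (what is proved, stated in full; the proofs are below) =====
def Claim_equal_verify_array_op : Prop := ∀ (Arreglo : List Int), Dom_verify_array_op Arreglo → Pre_verify_array_op Arreglo → Spec_verify_array_op Arreglo (verify_array_op Arreglo)

-- ===== LEMMAS AND PROOFS =====

-- peel the LAST iteration of A's factorial loop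
theorem factLoopA_peel (c f x : Int) (h : c ≤ x) :
    factLoopA c f x = factLoopA c f (x - 1) * x := by
  by_cases hcx : c = x
  · subst hcx
    rw [factLoopA, if_pos le_rfl, factLoopA, if_neg (by omega),
        factLoopA, if_neg (by omega)]
  · have hlt : c < x := lt_of_le_of_ne h hcx
    rw [factLoopA, if_pos h]
    rw [factLoopA_peel (c + 1) (f * c) x (by omega)]
    rw [show factLoopA c f (x - 1) = factLoopA (c + 1) (f * c) (x - 1) from by
      rw [factLoopA, if_pos (by omega)]]
termination_by (x - c).toNat
decreasing_by omega

-- glue two consecutive integer interval products (Mathlib's prod_Ioc_consecutive is ℕ-only)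
theorem prod_Ioc_glue (a b c : Int) (h1 : a ≤ b) (h2 : b ≤ c) :
    (∏ y ∈ Finset.Ioc a b, y) * ∏ y ∈ Finset.Ioc b c, y = ∏ y ∈ Finset.Ioc a c, y := by
  rw [← Finset.Ioc_union_Ioc_eq_Ioc h1 h2,
      Finset.prod_union (by rw [Finset.disjoint_left]; intro t ht1 ht2; simp at ht1 ht2; omega)]

-- B's balanced product computes the product of the integral interval (lo-1, hi]
theorem prodRange_eq_Ioc (lo hi : Int) :
    prodRange lo hi = ∏ x ∈ Finset.Ioc (lo - 1) hi, x := by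
  rw [prodRange]
  by_cases hgt : lo > hi
  · rw [if_pos hgt, Finset.Ioc_eq_empty (by omega), Finset.prod_empty]
  · rw [if_neg hgt]
    by_cases heq : lo = hi
    · subst heq
      rw [if_pos rfl, show Finset.Ioc (lo - 1) lo = {lo} from by ext y; simp; omega,
        Finset.prod_singleton]
    · rw [if_neg heq]
      have hmid := PySem.Int.floordiv_two_mid_bounds (le_of_not_gt hgt)
      have hlt : PySem.Int.floordiv (lo + hi) 2 < hi := by
        rw [PySem.Int.floordiv_eq_ediv_of_pos (by omega)]; omega
      show prodRange lo (PySem.Int.floordiv (lo + hi) 2) *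
          prodRange (PySem.Int.floordiv (lo + hi) 2 + 1) hi = _
      rw [prodRange_eq_Ioc lo (PySem.Int.floordiv (lo + hi) 2),
          prodRange_eq_Ioc (PySem.Int.floordiv (lo + hi) 2 + 1) hi,
          add_sub_cancel_right]
      exact prod_Ioc_glue _ _ _ (by omega) (by omega)
termination_by (hi - lo).toNat
decreasing_by
  all_goals simp only [PySem.Int.floordiv_eq_ediv_of_pos (by omega : (0:Int) < 2)] at *
  all_goals omega

-- A's while-loop factorial computes the same interval product
theorem factLoopA_eq_Ioc (x : Int) :
    factLoopA 1 1 x = ∏ y ∈ Finset.Ioc 1 x, y := by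
  by_cases h1 : x ≤ 1
  · rw [Finset.Ioc_eq_empty (by omega), Finset.prod_empty, factLoopA]
    by_cases h0 : 1 ≤ x
    · rw [if_pos h0, factLoopA, if_neg (by omega)]; ring
    · rw [if_neg h0]
  · rw [factLoopA_peel 1 1 x (by omega), factLoopA_eq_Ioc (x - 1),
        ← prod_Ioc_glue 1 (x - 1) x (by omega) (by omega),
        show Finset.Ioc (x - 1) x = {x} from by ext y; simp; omega,
        Finset.prod_singleton]
termination_by x.toNat
decreasing_by omega

theorem factLoopA_eq_prodRange (x : Int) : factLoopA 1 1 x = prodRange 2 x := by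
  rw [factLoopA_eq_Ioc, prodRange_eq_Ioc]
  norm_num

-- ===== VERDICT (by name: the statement is the Claim_ definition above) =====
theorem verify_array_op_spec : Claim_equal_verify_array_op := by
  intro Arreglo _ hPre
  obtain ⟨hlen, _⟩ := hPre
  match Arreglo, hlen with
  | a :: b :: c :: rest, _ =>
    show verify_array_op _ = verify_array_op_alt _
    have h0 : (0:Int) ≤ (rest.length:Int) + 1 + 1 := by positivity
    have h1 : (0:Int) ≤ (rest.length:Int) + 1 := by positivity
    have h2 : (2:Int) ≤ (rest.length:Int) + 1 + 1 := by omega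
    simp [verify_array_op, verifyLoopA, verify_array_op_alt, PySem.List.pyGet?,
      PySem.List.pyIdx?, multiple_op, factLoopA_eq_prodRange, h0, h1, h2]
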